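-- pv_equiv track=rewrite | github.com/luigidino33/ygo-tcg-ph-swiss-maker | api/index.py | _pair_within_bracket
-- ===== SOURCE A (Python) =====
-- from typing import List, Optional, Dict
--
-- def _pair_within_bracket(order: list[str], prior_pairs: set[tuple[str, str]], allow_rematches: bool = False) -> Optional[list[tuple[str, str]]]:
--   n = len(order)
--   used = [False] * n
--   pairs: list[tuple[str, str]] = []
--   prior_lookup = {(a, b) if a < b else (b, a) for (a, b) in prior_pairs}
--
--   def bt(start_idx: int) -> bool:
--     i = start_idx
--     while i < n and used[i]:
--       i += 1
--     if i >= n: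
--       return True
--     used[i] = True
--     for j in range(i + 1, n):
--       if used[j]:
--         continue
--       a, b = order[i], order[j]
--       if not allow_rematches:
--         key = (a, b) if a < b else (b, a)
--         if key in prior_lookup:
--           continue
--       used[j] = True
--       pairs.append((a, b))
--       if bt(i + 1):
--         return True
--       pairs.pop()
--       used[j] = False
--     used[i] = False
--     return False
--
--   ok = bt(0)
--   return pairs if ok else None
-- ===== SOURCE B (Python) =====
-- def _pair_within_bracket(order, prior_pairs, allow_rematches=False):
--   prior = {(a, b) if a < b else (b, a) for (a, b) in prior_pairs}
--
--   def solve(players):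
--     if not players:
--       return []
--     a, rest = players[0], players[1:]
--     pre = []
--     while rest:
--       b, rest = rest[0], rest[1:]
--       if allow_rematches or ((a, b) if a < b else (b, a)) not in prior:
--         sub = solve(pre + rest)
--         if sub is not None:
--           return [(a, b)] + sub
--       pre = pre + [b]
--     return None
--
--   return solve(list(order))
-- ===== Notes on version B (the rewrite author's own statement) =====
-- stated objective: alternative
-- what changed: Replaces A's shared mutable used-mask/pairs state with a start_idx scan by a pure functional recursion over the shrinking list of still-unpaired players, returning the pairing as a value ([(a,b)]+sub) instead of mutating an accumulator with append/pop backtracking.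
import Mathlib
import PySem

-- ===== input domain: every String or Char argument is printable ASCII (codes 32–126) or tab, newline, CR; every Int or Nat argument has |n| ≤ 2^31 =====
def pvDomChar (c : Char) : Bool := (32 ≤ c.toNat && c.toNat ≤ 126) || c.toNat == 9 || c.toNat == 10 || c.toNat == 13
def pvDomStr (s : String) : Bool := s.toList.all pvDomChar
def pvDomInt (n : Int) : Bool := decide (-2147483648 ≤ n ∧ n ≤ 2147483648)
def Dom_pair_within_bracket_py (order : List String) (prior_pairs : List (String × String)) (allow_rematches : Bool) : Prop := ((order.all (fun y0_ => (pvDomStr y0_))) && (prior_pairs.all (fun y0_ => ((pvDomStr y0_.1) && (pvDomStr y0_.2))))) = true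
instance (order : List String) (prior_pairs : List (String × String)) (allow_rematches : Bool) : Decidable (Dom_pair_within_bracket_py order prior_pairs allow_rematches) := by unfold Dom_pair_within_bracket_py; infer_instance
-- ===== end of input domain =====

-- B replaces A's used-mask + start_idx backtracking with a functional recursion over the
-- list of still-unpaired players (objective: alternative decomposition; same search order, same result).


-- ===== PORT A =====
-- `(a, b) if a < b else (b, a)` — the normalisation both Pythons apply to a pair
def pvNorm (p : String × String) : String × String := if p.1 < p.2 then p else (p.2, p.1)

-- A's nested `bt`: the `while i < n and used[i]` scan and the `for j in range(i+1, n)` loop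
-- become mutual recursion; the loop index j is carried as the offset d (j = i+1+d).
-- All list indices are in range when reached, so getD is exact there.
mutual
def pvBt (order : List String) (prior : PySem.Set (String × String)) (allow : Bool)
    (used : List Bool) (start : Nat) (pairs : List (String × String)) :
    Option (List (String × String)) :=
  if h : start < order.length then
    if used.getD start false then
      pvBt order prior allow used (start + 1) pairs
    else
      pvTryJ order prior allow (used.set start true) start 0 pairs
  else some pairs
termination_by (order.length - start, 1, 0)

def pvTryJ (order : List String) (prior : PySem.Set (String × String)) (allow : Bool)
    (used : List Bool) (i d : Nat) (pairs : List (String × String)) :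
    Option (List (String × String)) :=
  if h : i + 1 + d < order.length then
    if used.getD (i + 1 + d) false then pvTryJ order prior allow used i (d + 1) pairs
    else
      let a := order.getD i ""
      let b := order.getD (i + 1 + d) ""
      if !allow && decide (pvNorm (a, b) ∈ prior) then
        pvTryJ order prior allow used i (d + 1) pairs
      else
        match pvBt order prior allow (used.set (i + 1 + d) true) (i + 1) (pairs ++ [(a, b)]) with
        | some r => some r
        | none => pvTryJ order prior allow used i (d + 1) pairs
  else none
termination_by (order.length - i, 0, order.length - (i + 1 + d))
end

-- ===== PORT B =====
-- B's `solve` over the list of still-unpaired players; `pvPick` is its inner while-loop,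
-- carrying the already-skipped prefix `pre`.
mutual
def pvSolve (prior : PySem.Set (String × String)) (allow : Bool) :
    List String → Option (List (String × String))
  | [] => some []
  | a :: rest => pvPick prior allow a [] rest
termination_by players => (players.length, players.length + 1)

def pvPick (prior : PySem.Set (String × String)) (allow : Bool) (a : String)
    (pre post : List String) : Option (List (String × String)) :=
  match post with
  | [] => none
  | b :: post' =>
    if allow || !decide (pvNorm (a, b) ∈ prior) then
      match pvSolve prior allow (pre ++ post') with
      | some sub => some ((a, b) :: sub)
      | none => pvPick prior allow a (pre ++ [b]) post'
    else pvPick prior allow a (pre ++ [b]) post'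
termination_by (pre.length + post.length + 1, post.length)
decreasing_by all_goals (simp [Prod.lex_def]; try omega)
end



def pair_within_bracket_py (order : List String) (prior_pairs : List (String × String)) (allow_rematches : Bool) : Option (List (String × String)) :=
  pvBt order (PySem.Set.ofList (prior_pairs.map pvNorm)) allow_rematches
    (List.replicate order.length false) 0 []

def pair_within_bracket_py_alt (order : List String) (prior_pairs : List (String × String)) (allow_rematches : Bool) : Option (List (String × String)) :=
  pvSolve (PySem.Set.ofList (prior_pairs.map pvNorm)) allow_rematches order

-- ===== PRECONDITION & SPEC =====
def Spec_pair_within_bracket_py (order : List String) (prior_pairs : List (String × String)) (allow_rematches : Bool) (out : Option (List (String × String))) : Prop := out = pair_within_bracket_py_alt order prior_pairs allow_rematches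
instance (order : List String) (prior_pairs : List (String × String)) (allow_rematches : Bool) (out : Option (List (String × String))) : Decidable (Spec_pair_within_bracket_py order prior_pairs allow_rematches out) := by unfold Spec_pair_within_bracket_py; infer_instance

-- ===== CLAIM (what is proved, stated in full; the proofs are below) =====
def Claim_equal_pair_within_bracket_py : Prop := ∀ (order : List String) (prior_pairs : List (String × String)) (allow_rematches : Bool), Dom_pair_within_bracket_py order prior_pairs allow_rematches → Spec_pair_within_bracket_py order prior_pairs allow_rematches (pair_within_bracket_py order prior_pairs allow_rematches)

-- ===== LEMMAS AND PROOFS =====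

-- pvFree order used k = the players at the still-free indices ≥ k, in index order;
-- pvFreeTo order used k j = the same restricted to [k, j)
def pvFree (order : List String) (used : List Bool) (k : Nat) : List String :=
  if h : k < order.length then
    if used.getD k false then pvFree order used (k + 1)
    else order.getD k "" :: pvFree order used (k + 1)
  else []
termination_by order.length - k

def pvFreeTo (order : List String) (used : List Bool) (k j : Nat) : List String :=
  if h : k < j then
    (if used.getD k false then [] else [order.getD k ""]) ++ pvFreeTo order used (k + 1) j
  else []
termination_by j - k

theorem pvGetD_set_ne (used : List Bool) (v : Bool) {j k : Nat} (h : j ≠ k) :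
    (used.set j v).getD k false = used.getD k false := by
  simp [List.getD, List.getElem?_set_ne h]

theorem pvFree_set_lt (order : List String) (used : List Bool) (v : Bool) {j : Nat} :
    ∀ k, j < k → pvFree order (used.set j v) k = pvFree order used k := by
  intro k
  induction k using pvFree.induct (order := order) (used := used) with
  | case1 k hk hu ih =>
    intro hj
    conv_lhs => rw [pvFree]
    conv_rhs => rw [pvFree]
    simp only [pvGetD_set_ne used v (by omega : j ≠ k), dif_pos hk, if_pos hu, ih (by omega)]
  | case2 k hk hu ih =>
    intro hj
    conv_lhs => rw [pvFree]
    conv_rhs => rw [pvFree]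
    simp only [pvGetD_set_ne used v (by omega : j ≠ k), dif_pos hk, if_neg hu, ih (by omega)]
  | case3 k hk =>
    intro hj
    conv_lhs => rw [pvFree]
    conv_rhs => rw [pvFree]
    simp [hk]

theorem pvFreeTo_set_ge (order : List String) (used : List Bool) (v : Bool) {m j : Nat}
    (h : j ≤ m) : ∀ k, pvFreeTo order (used.set m v) k j = pvFreeTo order used k j := by
  intro k
  induction k using pvFreeTo.induct (j := j) with
  | case1 k hk ih =>
    conv_lhs => rw [pvFreeTo]
    conv_rhs => rw [pvFreeTo]
    simp only [pvGetD_set_ne used v (by omega : m ≠ k), dif_pos hk, ih]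
  | case2 k hk =>
    conv_lhs => rw [pvFreeTo]
    conv_rhs => rw [pvFreeTo]
    simp [hk]

theorem pvFreeTo_self (order : List String) (used : List Bool) (k : Nat) :
    pvFreeTo order used k k = [] := by rw [pvFreeTo]; simp

theorem pvFreeTo_snoc (order : List String) (used : List Bool) {j : Nat} :
    ∀ k, k ≤ j → pvFreeTo order used k (j + 1)
      = pvFreeTo order used k j ++ (if used.getD j false then [] else [order.getD j ""]) := by
  intro k
  induction k using pvFreeTo.induct (j := j) with
  | case1 k hk ih =>
    intro _
    conv_lhs => rw [pvFreeTo]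
    conv_rhs => rw [pvFreeTo]
    simp only [dif_pos (by omega : k < j + 1), dif_pos hk, ih (by omega), List.append_assoc]
  | case2 k hk =>
    intro hkj
    have : k = j := by omega
    subst this
    conv_lhs => rw [pvFreeTo]
    simp [pvFreeTo_self, pvFreeTo, hk]

theorem pvFree_split (order : List String) (used : List Bool) {j : Nat} (hj : j ≤ order.length) :
    ∀ k, k ≤ j → pvFree order used k = pvFreeTo order used k j ++ pvFree order used j := by
  intro k
  induction k using pvFree.induct (order := order) (used := used) with
  | case1 k hk hu ih =>
    intro hkj
    by_cases hlt : k < j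
    · conv_lhs => rw [pvFree]
      conv_rhs => rw [pvFreeTo]
      simp only [dif_pos hk, if_pos hu, dif_pos hlt, ih (by omega), hu]
      simp
    · have : k = j := by omega
      subst this
      simp [pvFreeTo_self]
  | case2 k hk hu ih =>
    intro hkj
    by_cases hlt : k < j
    · conv_lhs => rw [pvFree]
      conv_rhs => rw [pvFreeTo]
      simp only [dif_pos hk, if_neg hu, dif_pos hlt, ih (by omega)]
      simp [hu]
    · have : k = j := by omega
      subst this
      simp [pvFreeTo_self]
  | case3 k hk =>
    intro hkj
    have : k = j := by omega
    subst this
    simp [pvFreeTo_self]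

-- marking a free index j splits the free list at j
theorem pvFree_set_free (order : List String) (used : List Bool) {j : Nat}
    (hlen : used.length = order.length) (hj : j < order.length)
    (hu : used.getD j false = false) :
    ∀ k, k ≤ j → pvFree order (used.set j true) k
      = pvFreeTo order used k j ++ pvFree order used (j + 1) := by
  intro k hk
  rw [pvFree_split order (used.set j true) (by omega) k hk,
      pvFreeTo_set_ge order used true (le_refl j) k]
  congr 1
  rw [pvFree]
  have hset : (used.set j true).getD j false = true := by
    simp [List.getD, List.getElem?_set_self (by omega : j < used.length)]
  simp only [dif_pos hj, hset, if_pos rfl]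
  exact pvFree_set_lt order used true (j + 1) (by omega)

theorem pvFree_replicate (order : List String) :
    ∀ k, pvFree order (List.replicate order.length false) k = order.drop k := by
  intro k
  induction k using pvFree.induct (order := order) (used := List.replicate order.length false) with
  | case1 k hk hu ih =>
    exfalso
    simp [List.getD, List.getElem?_replicate, hk] at hu
  | case2 k hk hu ih =>
    rw [pvFree]
    simp only [dif_pos hk, if_neg hu, ih]
    rw [List.drop_eq_getElem_cons hk]
    simp [List.getD, List.getElem?_eq_getElem hk]
  | case3 k hk =>
    rw [pvFree]
    simp [hk, List.drop_eq_nil_iff]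
    omega

theorem pvMain (order : List String) (prior : PySem.Set (String × String)) (allow : Bool) :
    (∀ (used : List Bool) (start : Nat) (pairs : List (String × String)),
        used.length = order.length →
        pvBt order prior allow used start pairs
          = (pvSolve prior allow (pvFree order used start)).map (pairs ++ ·)) ∧
    (∀ (used : List Bool) (i d : Nat) (pairs : List (String × String)),
        used.length = order.length →
        pvTryJ order prior allow used i d pairs
          = (pvPick prior allow (order.getD i "") (pvFreeTo order used (i + 1) (i + 1 + d))
              (pvFree order used (i + 1 + d))).map (pairs ++ ·)) := by
  apply pvBt.mutual_induct order prior allow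
    (motive1 := fun used start pairs => used.length = order.length →
        pvBt order prior allow used start pairs
          = (pvSolve prior allow (pvFree order used start)).map (pairs ++ ·))
    (motive2 := fun used i d pairs => used.length = order.length →
        pvTryJ order prior allow used i d pairs
          = (pvPick prior allow (order.getD i "") (pvFreeTo order used (i + 1) (i + 1 + d))
              (pvFree order used (i + 1 + d))).map (pairs ++ ·))
  · -- bt, scan past a used index
    intro used start pairs hk hu ih hlen
    conv_lhs => rw [pvBt]
    conv_rhs => rw [pvFree]
    simp only [dif_pos hk, if_pos hu]
    exact ih hlen
  · -- bt, first free index found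
    intro used start pairs hk hu ih hlen
    conv_lhs => rw [pvBt]
    conv_rhs => rw [pvFree]
    simp only [dif_pos hk, if_neg hu]
    rw [ih (by simpa using hlen)]
    rw [pvFreeTo_self, pvFree_set_lt order used true (start + 1) (by omega)]
    conv_rhs => rw [pvSolve]
  · -- bt, start ≥ n
    intro used start pairs hk hlen
    conv_lhs => rw [pvBt]
    conv_rhs => rw [pvFree]
    simp only [dif_neg hk]
    rw [pvSolve]
    simp
  · -- tryJ, j used
    intro used i d pairs hk hu ih hlen
    conv_lhs => rw [pvTryJ]
    conv_rhs => rw [pvFree]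
    simp only [dif_pos hk, if_pos hu]
    rw [ih hlen]
    have e1 : i + 1 + (d + 1) = (i + 1 + d) + 1 := by omega
    rw [e1, pvFreeTo_snoc order used (i + 1) (by omega), hu]
    simp
  · -- tryJ, j free but banned rematch
    intro used i d pairs hk hu a' b' hban ih hlen
    simp only [show a' = order.getD i "" from rfl, show b' = order.getD (i + 1 + d) "" from rfl] at hban
    rw [Bool.not_eq_true] at hu
    conv_lhs => rw [pvTryJ]
    conv_rhs => rw [pvFree]
    simp only [dif_pos hk, hu, Bool.false_eq_true, if_false, if_pos hban]
    rw [ih hlen]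
    have e1 : i + 1 + (d + 1) = (i + 1 + d) + 1 := by omega
    rw [e1, pvFreeTo_snoc order used (i + 1) (by omega), hu]
    conv_rhs => rw [pvPick]
    have hcond : (allow || !decide (pvNorm (order.getD i "", order.getD (i + 1 + d) "") ∈ prior)) = false := by
      cases allow <;> simp_all
    rw [hcond]
    simp
  · -- tryJ, recursion succeeds
    intro used i d pairs hk hu a' b' hban r hsome ih hlen
    simp only [show a' = order.getD i "" from rfl, show b' = order.getD (i + 1 + d) "" from rfl] at hban hsome
    rw [Bool.not_eq_true] at hu
    rw [Bool.not_eq_true] at hban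
    have hfree : pvFree order (used.set (i + 1 + d) true) (i + 1)
        = pvFreeTo order used (i + 1) (i + 1 + d) ++ pvFree order used (i + 1 + d + 1) :=
      pvFree_set_free order used hlen hk hu (i + 1) (by omega)
    have hbt := ih (by simpa using hlen)
    rw [hfree] at hbt
    conv_lhs => rw [pvTryJ]
    conv_rhs => rw [pvFree]
    simp only [dif_pos hk, hu, Bool.false_eq_true, if_false, hban, hsome]
    have hcond : (allow || !decide (pvNorm (order.getD i "", order.getD (i + 1 + d) "") ∈ prior)) = true := by
      cases allow <;> simp_all
    conv_rhs => rw [pvPick]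
    rw [hcond]
    simp only [if_true]
    cases hsub : pvSolve prior allow (pvFreeTo order used (i + 1) (i + 1 + d) ++ pvFree order used (i + 1 + d + 1)) with
    | none => rw [hbt, hsub] at hsome; simp at hsome
    | some sub =>
      rw [hbt, hsub] at hsome
      simp only [Option.map_some] at hsome
      rw [← Option.some.inj hsome]
      simp
      exact ⟨rfl, rfl⟩
  · -- tryJ, recursion fails
    intro used i d pairs hk hu a' b' hban hnone ih ih2 hlen
    simp only [show a' = order.getD i "" from rfl, show b' = order.getD (i + 1 + d) "" from rfl] at hban hnone
    have hab : a' = order.getD i "" := rfl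
    have hbb : b' = order.getD (i + 1 + d) "" := rfl
    rw [Bool.not_eq_true] at hu
    rw [Bool.not_eq_true] at hban
    have hfree : pvFree order (used.set (i + 1 + d) true) (i + 1)
        = pvFreeTo order used (i + 1) (i + 1 + d) ++ pvFree order used (i + 1 + d + 1) :=
      pvFree_set_free order used hlen hk hu (i + 1) (by omega)
    have hbt := ih (by simpa using hlen)
    simp only [hab, hbb] at hbt
    rw [hfree] at hbt
    rw [hbt] at hnone
    have hsub : pvSolve prior allow (pvFreeTo order used (i + 1) (i + 1 + d) ++ pvFree order used (i + 1 + d + 1)) = none := by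
      cases hx : pvSolve prior allow (pvFreeTo order used (i + 1) (i + 1 + d) ++ pvFree order used (i + 1 + d + 1)) with
      | none => rfl
      | some sub => rw [hx] at hnone; simp at hnone
    conv_lhs => rw [pvTryJ]
    conv_rhs => rw [pvFree]
    simp only [dif_pos hk, hu, Bool.false_eq_true, if_false, hban, hbt, hsub, Option.map_none]
    have hcond : (allow || !decide (pvNorm (order.getD i "", order.getD (i + 1 + d) "") ∈ prior)) = true := by
      cases allow <;> simp_all
    conv_rhs => rw [pvPick]
    rw [hcond]
    simp only [if_true, hsub]
    rw [ih2 hlen]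
    have e1 : i + 1 + (d + 1) = (i + 1 + d) + 1 := by omega
    rw [e1, pvFreeTo_snoc order used (i + 1) (by omega), hu]
    simp
  · -- tryJ, j ≥ n
    intro used i d pairs hk hlen
    conv_lhs => rw [pvTryJ]
    conv_rhs => rw [pvFree]
    simp only [dif_neg hk]
    rw [pvPick]
    simp

theorem pvEntry (order : List String) (prior_pairs : List (String × String)) (allow_rematches : Bool) :
    pair_within_bracket_py order prior_pairs allow_rematches
      = pair_within_bracket_py_alt order prior_pairs allow_rematches := by
  unfold pair_within_bracket_py pair_within_bracket_py_alt
  rw [(pvMain order (PySem.Set.ofList (prior_pairs.map pvNorm)) allow_rematches).1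
      (List.replicate order.length false) 0 [] (by simp)]
  rw [pvFree_replicate order 0, List.drop_zero]
  cases h : pvSolve (PySem.Set.ofList (prior_pairs.map pvNorm)) allow_rematches order <;> simp [h]

-- ===== VERDICT (by name: the statement is the Claim_ definition above) =====
theorem pair_within_bracket_py_spec : Claim_equal_pair_within_bracket_py := by
  intro order prior_pairs allow_rematches _
  exact pvEntry order prior_pairs allow_rematches
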